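-- pv_equiv track=rewrite | github.com/iTudor19/Python_2023 | lab2.py | ordonare
-- ===== SOURCE A (Python) =====
-- def ordonare(words):
--     groups = []
--     while words:
--         current_word = words[0]
--         current_group = [current_word]
--         words = words[1:]
--         for word in words[:]:
--             if word[-2:] == current_word[-2:]:
--                 current_group.append(word)
--                 words.remove(word)
--         groups.append(current_group)
--     return groups
-- ===== SOURCE B (Python) =====
-- def ordonare(words):
--     keys = []
--     for w in words:
--         k = w[-2:]
--         if k not in keys:
--             keys.append(k)
--     return [[w for w in words if w[-2:] == k] for k in keys]
-- ===== Notes on version B (the rewrite author's own statement) =====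
-- stated objective: alternative
-- what changed: B replaces A's destructive pick-and-remove while-loop over shrinking list copies with a non-mutating two-phase algorithm: one pass collecting the distinct last-two-character keys in first-appearance order, then one filtering pass per key.
import Mathlib
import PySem

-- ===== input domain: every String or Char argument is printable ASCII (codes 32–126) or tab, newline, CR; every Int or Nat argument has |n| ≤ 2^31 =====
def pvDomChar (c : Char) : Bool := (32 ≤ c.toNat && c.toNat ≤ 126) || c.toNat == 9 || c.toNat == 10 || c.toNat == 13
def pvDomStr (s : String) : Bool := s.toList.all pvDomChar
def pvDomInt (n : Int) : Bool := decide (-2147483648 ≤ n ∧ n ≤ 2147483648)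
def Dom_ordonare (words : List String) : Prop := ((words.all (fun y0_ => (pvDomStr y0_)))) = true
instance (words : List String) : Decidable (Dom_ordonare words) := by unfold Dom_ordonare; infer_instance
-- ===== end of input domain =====

-- B replaces A's destructive pick-and-remove while-loop with a non-mutating pass that
-- collects distinct last-two-character keys in first-appearance order and then filters per key
-- (alternative decomposition, same asymptotic cost; return value only — A never mutates its caller's list).


-- ===== PORT A =====
-- w[-2:]
def pvKey (w : String) : String := PySem.Str.slice w (some (-2)) none

-- one step of A's inner 'for word in words[:]' loop; state = (current_group, words)
def pvStepA (k : String) (s : List String × List String) (word : String) :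
    List String × List String :=
  if pvKey word == k then
    -- words.remove(word): ValueError is unreachable here (word is present), so getD never fires
    (s.1 ++ [word], (PySem.List.remove? s.2 word).getD s.2)
  else s

-- the fold never lengthens the remaining-words component (for termination of the while loop)
theorem pvStepA_len (k : String) (c : List String) :
    ∀ (g d : List String), ((c.foldl (pvStepA k) (g, d)).2).length ≤ d.length := by
  induction c with
  | nil => intro g d; simp
  | cons w c ih =>
    intro g d
    simp only [List.foldl_cons, pvStepA]
    split
    · refine le_trans (ih _ _) ?_
      cases h : PySem.List.remove? d w with
      | none => simp
      | some r =>
        have hm : w ∈ d := by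
          by_contra hn
          rw [(PySem.List.remove?_eq_none_iff d w).2 hn] at h; cases h
        rw [PySem.List.remove?_eq_some_erase d w hm] at h
        cases h
        have := List.length_erase_of_mem hm
        simp only [Option.getD_some]
        omega
    · exact ih _ _

def ordonare (words : List String) : List (List String) :=
  match words with
  | [] => []
  | cw :: ws =>
    let st := ws.foldl (pvStepA (pvKey cw)) ([cw], ws)
    st.1 :: ordonare st.2
termination_by words.length
decreasing_by
  simp only [List.foldl_attach, List.length_cons]
  exact Nat.lt_succ_of_le (pvStepA_len (pvKey cw) ws [cw] ws)

-- ===== PORT B =====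
def pvCollect (ks : List String) (w : String) : List String :=
  if pvKey w ∈ ks then ks else ks ++ [pvKey w]

def ordonare_alt (words : List String) : List (List String) :=
  let keys := words.foldl pvCollect []
  keys.map (fun k => words.filter (fun w => pvKey w == k))

-- ===== PRECONDITION & SPEC =====
def Spec_ordonare (words : List String) (out : List (List String)) : Prop := out = ordonare_alt words
instance (words : List String) (out : List (List String)) : Decidable (Spec_ordonare words out) := by unfold Spec_ordonare; infer_instance

-- ===== CLAIM (what is proved, stated in full; the proofs are below) =====
def Claim_equal_ordonare : Prop := ∀ (words : List String), Dom_ordonare words → Spec_ordonare words (ordonare words)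

-- ===== LEMMAS AND PROOFS =====

-- removing a present element past an unequal prefix
theorem pvRemove_skip (w : String) (c : List String) :
    ∀ (pre : List String), (∀ x ∈ pre, x ≠ w) →
    PySem.List.remove? (pre ++ w :: c) w = some (pre ++ c) := by
  intro pre
  induction pre with
  | nil => intro _; simp
  | cons x pre ih =>
    intro h
    have hx : x ≠ w := h x (by simp)
    simp only [List.cons_append]
    rw [PySem.List.remove?_cons_of_ne _ hx, ih (fun y hy => h y (by simp [hy]))]
    rfl

-- A's inner loop = one partition pass
theorem pvLoopA (k : String) (c : List String) :
    ∀ (pre g : List String), (∀ x ∈ pre, ¬ (pvKey x == k)) →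
    c.foldl (pvStepA k) (g, pre ++ c)
      = (g ++ c.filter (fun w => pvKey w == k),
         pre ++ c.filter (fun w => !(pvKey w == k))) := by
  induction c with
  | nil => intro pre g _; simp
  | cons w c ih =>
    intro pre g hpre
    simp only [List.foldl_cons]
    by_cases hw : pvKey w == k
    · have hne : ∀ x ∈ pre, x ≠ w := by
        intro x hx hxw
        exact hpre x hx (by rw [hxw]; exact hw)
      have : pvStepA k (g, pre ++ w :: c) w = (g ++ [w], pre ++ c) := by
        simp only [pvStepA, hw, pvRemove_skip w c pre hne]
        simp
      rw [this, ih pre (g ++ [w]) hpre]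
      simp [hw]
    · have : pvStepA k (g, pre ++ w :: c) w = (g, (pre ++ [w]) ++ c) := by
        simp [pvStepA, hw]
      rw [this, ih (pre ++ [w]) g (by
        intro x hx
        rcases List.mem_append.1 hx with h | h
        · exact hpre x h
        · simp at h; subst h; exact fun hc => hw hc)]
      simp [hw]

-- A's one while-iteration, cleaned up
theorem pvOrdA_cons (cw : String) (ws : List String) :
    ordonare (cw :: ws)
      = (cw :: ws.filter (fun w => pvKey w == pvKey cw))
        :: ordonare (ws.filter (fun w => !(pvKey w == pvKey cw))) := by
  rw [ordonare]
  have := pvLoopA (pvKey cw) ws [] [cw] (by simp)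
  simp only [List.nil_append] at this
  simp [this]

-- key-collection ignores elements whose key is already collected
theorem pvCollect_skip (k : String) (l : List String) :
    ∀ (ks : List String), k ∈ ks →
    l.foldl pvCollect ks = (l.filter (fun w => !(pvKey w == k))).foldl pvCollect ks := by
  induction l with
  | nil => intro _ _; simp
  | cons w l ih =>
    intro ks hk
    by_cases hw : pvKey w == k
    · have hmem : pvKey w ∈ ks := by rw [eq_of_beq hw]; exact hk
      have h1 : pvCollect ks w = ks := by simp [pvCollect, hmem]
      simp only [List.foldl_cons, h1, List.filter_cons, hw, Bool.not_true,
        Bool.false_eq_true, if_false]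
      exact ih ks hk
    · have hmem : k ∈ pvCollect ks w := by
        simp only [pvCollect]; split <;> simp [hk]
      simp only [List.filter_cons, hw, Bool.not_false, List.foldl_cons]
      simp only [if_true]
      exact ih _ hmem
-- a seen-prefix whose keys never recur can be split off the accumulator
theorem pvCollect_prefix (l : List String) :
    ∀ (ks₀ ks : List String), (∀ w ∈ l, pvKey w ∉ ks₀) →
    l.foldl pvCollect (ks₀ ++ ks) = ks₀ ++ l.foldl pvCollect ks := by
  induction l with
  | nil => intro _ _ _; simp
  | cons w l ih =>
    intro ks₀ ks h
    have hw : pvKey w ∉ ks₀ := h w (by simp)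
    have : pvCollect (ks₀ ++ ks) w = ks₀ ++ pvCollect ks w := by
      simp only [pvCollect, List.mem_append]
      by_cases hks : pvKey w ∈ ks
      · simp [hks]
      · simp [hks, hw]
    simp only [List.foldl_cons, this]
    exact ih ks₀ _ (fun x hx => h x (by simp [hx]))

-- every collected key comes from the accumulator or from some element
theorem pvCollect_mem (l : List String) :
    ∀ (ks : List String) (k : String), k ∈ l.foldl pvCollect ks →
    k ∈ ks ∨ ∃ w ∈ l, pvKey w = k := by
  induction l with
  | nil => intro ks k h; simp at h; exact Or.inl h
  | cons w l ih =>
    intro ks k h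
    rcases ih _ k h with h' | ⟨x, hx, hk⟩
    · simp only [pvCollect] at h'
      by_cases hm : pvKey w ∈ ks
      · rw [if_pos hm] at h'; exact Or.inl h'
      · rw [if_neg hm] at h'
        rcases List.mem_append.1 h' with h'' | h''
        · exact Or.inl h''
        · simp at h''; exact Or.inr ⟨w, by simp, h''.symm⟩
    · exact Or.inr ⟨x, by simp [hx], hk⟩

theorem pvMain : ∀ (n : ℕ) (l : List String), l.length ≤ n → ordonare l = ordonare_alt l := by
  intro n
  induction n with
  | zero =>
    intro l hl
    have : l = [] := List.length_eq_zero_iff.1 (Nat.le_zero.1 hl)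
    subst this
    simp [ordonare, ordonare_alt]
  | succ n ih =>
    intro l hl
    cases l with
    | nil => simp [ordonare, ordonare_alt]
    | cons cw ws =>
      set k0 := pvKey cw with hk0
      set ws' := ws.filter (fun w => !(pvKey w == k0)) with hws'
      have hlen : ws'.length ≤ n := by
        rw [hws']
        have := List.length_filter_le (fun w => !(pvKey w == k0)) ws
        simp only [List.length_cons] at hl
        omega
      rw [pvOrdA_cons, ih ws' hlen]
      -- now compute B's value on cw :: ws
      show _ = ordonare_alt (cw :: ws)
      unfold ordonare_alt
      have hkeys : (cw :: ws).foldl pvCollect [] = k0 :: ws'.foldl pvCollect [] := by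
        have h1 : (cw :: ws).foldl pvCollect [] = ws.foldl pvCollect [k0] := by
          simp only [List.foldl_cons, pvCollect, List.mem_nil_iff, if_neg (fun h => h),
            List.nil_append, ← hk0]
        rw [h1, pvCollect_skip k0 ws [k0] (by simp), ← hws']
        have := pvCollect_prefix ws' [k0] [] (by
          intro w hw
          rw [hws'] at hw
          have := (List.mem_filter.1 hw).2
          simp only [List.mem_singleton]
          intro hc
          rw [hc] at this; simp at this)
        simpa using this
      rw [hkeys]
      simp only [List.map_cons]
      congr 1
      · simp [k0]
      · apply List.map_congr_left
        intro k hk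
        symm
        rcases pvCollect_mem ws' [] k hk with h | ⟨w, hw, hwk⟩
        · simp at h
        · have hkne : ¬ (k = k0) := by
            have h2 := (List.mem_filter.1 (by rw [← hws']; exact hw)).2
            have h3 : pvKey w ≠ k0 := by simpa using h2
            exact fun hc => h3 (hwk.trans hc)
          rw [List.filter_cons]
          have hcw : ¬ (pvKey cw == k) = true := by
            simp only [beq_iff_eq, ← hk0]
            intro hc; exact hkne hc.symm
          rw [if_neg (by simpa using hcw)]
          rw [hws', List.filter_filter]
          symm
          apply List.filter_congr
          intro x _
          by_cases hx : pvKey x == k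
          · have : ¬ (pvKey x == k0) = true := by
              simp only [beq_iff_eq] at hx ⊢
              rw [hx]; exact fun hc => hkne hc
            simp [hx, this]
          · simp [hx]

-- ===== VERDICT (by name: the statement is the Claim_ definition above) =====
theorem ordonare_spec : Claim_equal_ordonare := by
  intro words _
  exact pvMain words.length words le_rfl
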